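-- pv_equiv track=rewrite | github.com/Sts-LMM/podstawy_programowania | zajecia_3/python_string/4_occurrencies_into_$.py | into_dollar
-- ===== SOURCE A (Python) =====
-- def into_dollar(sentence):
--     get_dollared = ''
--     dictionary = {}
--     for char in sentence:
--         if char in dictionary:
--             dictionary[char] += 1
--             get_dollared += "$"
--         else:
--             dictionary[char] = 1
--             get_dollared += char
--     return get_dollared
-- ===== SOURCE B (Python) =====
-- def into_dollar(sentence):
--     out = ["$"] * len(sentence)
--     for c in dict.fromkeys(sentence):
--         out[sentence.index(c)] = c
--     return "".join(out)
-- ===== Notes on version B (the rewrite author's own statement) =====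
-- stated objective: faster
-- what changed: Instead of A's single left-to-right pass over every character with a maintained seen-dict and string concatenation, B pre-fills an all-dollar output array and, for each of the k distinct characters, writes it back at its first-occurrence index found by sentence.index; the per-character Python-level loop is replaced by k C-level index scans.
import Mathlib
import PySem

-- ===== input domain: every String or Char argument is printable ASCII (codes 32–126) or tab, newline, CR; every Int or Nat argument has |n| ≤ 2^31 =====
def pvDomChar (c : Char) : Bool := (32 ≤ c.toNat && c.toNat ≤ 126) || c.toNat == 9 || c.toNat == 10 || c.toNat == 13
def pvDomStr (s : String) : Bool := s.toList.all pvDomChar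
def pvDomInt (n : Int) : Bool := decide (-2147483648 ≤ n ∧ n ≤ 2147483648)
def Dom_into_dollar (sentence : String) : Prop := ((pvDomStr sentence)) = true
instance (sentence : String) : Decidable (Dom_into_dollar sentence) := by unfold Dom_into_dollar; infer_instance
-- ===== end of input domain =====

-- B replaces A's single pass with a seen-dict by a different algorithm: pre-fill an
-- all-'$' output array, then restore each distinct character at its first-occurrence
-- index; return values proved identical on all inputs.

-- ===== PORT A =====
def into_dollar (sentence : String) : String :=
  -- get_dollared/dictionary are the two components of the fold state
  String.mk (sentence.toList.foldl
    (fun (st : List Char × PySem.Dict Char Int) char =>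
      if st.2.contains char then
        (st.1 ++ ['$'], st.2.modify char 0 (· + 1))
      else
        (st.1 ++ [char], st.2.insert char 1))
    ([], PySem.Dict.empty)).1

-- ===== PORT B =====
-- the loop body 'out[sentence.index(c)] = c'; sentence.index(c) never raises here
-- (c is a character of sentence); the 'none' arm only makes the match total.
def pvStep (s : List Char) (out : List Char) (c : Char) : List Char :=
  match PySem.List.index? s c with
  | some i => out.set i c
  | none => out

def into_dollar_alt (sentence : String) : String :=
  -- out = ["$"] * len(sentence); for c in dict.fromkeys(sentence): out[sentence.index(c)] = c
  -- dict.fromkeys iterates the distinct characters in first-occurrence order = PySem.List.dedup (exact).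
  String.mk ((PySem.List.dedup sentence.toList).foldl (pvStep sentence.toList)
    (List.replicate sentence.toList.length '$'))

-- ===== PRECONDITION & SPEC =====
def Spec_into_dollar (sentence : String) (out : String) : Prop := out = into_dollar_alt sentence
instance (sentence : String) (out : String) : Decidable (Spec_into_dollar sentence out) := by unfold Spec_into_dollar; infer_instance

-- ===== CLAIM (what is proved, stated in full; the proofs are below) =====
def Claim_equal_into_dollar : Prop := ∀ (sentence : String), Dom_into_dollar sentence → Spec_into_dollar sentence (into_dollar sentence)

-- ===== LEMMAS AND PROOFS =====

-- proof-only reference recursion: emit '$' for a char already seen in the prefix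
def pvMark (pre : List Char) : List Char → List Char
  | [] => []
  | c :: rest => (if c ∈ pre then '$' else c) :: pvMark (pre ++ [c]) rest

lemma pv_loopA (suf : List Char) : ∀ (pre acc : List Char) (d : PySem.Dict Char Int),
    (∀ c, d.contains c = decide (c ∈ pre)) →
    (suf.foldl
      (fun (st : List Char × PySem.Dict Char Int) char =>
        if st.2.contains char then
          (st.1 ++ ['$'], st.2.modify char 0 (· + 1))
        else
          (st.1 ++ [char], st.2.insert char 1))
      (acc, d)).1 = acc ++ pvMark pre suf := by
  induction suf with
  | nil => intro pre acc d _; simp [pvMark]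
  | cons c rest ih =>
    intro pre acc d hd
    simp only [List.foldl_cons, pvMark, hd c]
    by_cases hmem : c ∈ pre
    · simp only [hmem, decide_true, if_true]
      rw [ih (pre ++ [c]) (acc ++ ['$']) _ ?_]
      · simp
      · intro c'
        rw [PySem.Dict.contains_modify, hd c']
        by_cases h : c' = c <;> simp [h, hmem]
    · simp only [hmem, decide_false, Bool.false_eq_true, if_false]
      rw [ih (pre ++ [c]) (acc ++ [c]) _ ?_]
      · simp
      · intro c'
        rw [PySem.Dict.contains_insert, hd c']
        by_cases h : c' = c <;> simp [h]

lemma pv_step_length (s out : List Char) (c : Char) : (pvStep s out c).length = out.length := by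
  unfold pvStep; cases PySem.List.index? s c <;> simp

lemma pv_fold_get (s : List Char) (ds : List Char) : ∀ (out : List Char) (j : Nat),
    out.length = s.length →
    (ds.foldl (pvStep s) out)[j]? =
      if ∃ c ∈ ds, PySem.List.index? s c = some j then s[j]? else out[j]? := by
  induction ds with
  | nil => intro out j _; simp
  | cons c rest ih =>
    intro out j hlen
    rw [List.foldl_cons, ih (pvStep s out c) j (by rw [pv_step_length]; exact hlen)]
    by_cases hr : ∃ c' ∈ rest, PySem.List.index? s c' = some j
    · rw [if_pos hr, if_pos ⟨hr.choose, List.mem_cons_of_mem _ hr.choose_spec.1, hr.choose_spec.2⟩]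
    · rw [if_neg hr]
      unfold pvStep
      cases hidx : PySem.List.index? s c with
      | none =>
        rw [if_neg]
        rintro ⟨c', hc', hc'j⟩
        rcases List.mem_cons.1 hc' with h | h
        · subst h; rw [hidx] at hc'j; simp at hc'j
        · exact hr ⟨c', h, hc'j⟩
      | some i =>
        by_cases hij : i = j
        · subst hij
          obtain ⟨hk, hget, _⟩ := PySem.List.getElem_of_index?_eq_some hidx
          rw [if_pos ⟨c, List.mem_cons_self, hidx⟩]
          rw [List.getElem?_set_self (by omega), List.getElem?_eq_getElem hk, hget]
        · rw [List.getElem?_set_ne hij, if_neg]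
          rintro ⟨c', hc', hc'j⟩
          rcases List.mem_cons.1 hc' with h | h
          · subst h; rw [hidx] at hc'j; exact hij (Option.some.inj hc'j)
          · exact hr ⟨c', h, hc'j⟩

lemma pv_mark_get (suf : List Char) : ∀ (pre : List Char) (j : Nat),
    (pvMark pre suf)[j]? = (suf[j]?).map (fun c => if c ∈ pre ++ suf.take j then '$' else c) := by
  induction suf with
  | nil => intro pre j; simp [pvMark]
  | cons c rest ih =>
    intro pre j
    cases j with
    | zero => simp [pvMark]
    | succ k =>
      simp only [pvMark, List.getElem?_cons_succ, ih (pre ++ [c]) k, List.take_succ_cons]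
      congr 1
      funext c'
      congr 1
      simp [List.append_assoc]

lemma pv_first_iff (s : List Char) (j : Nat) (hj : j < s.length) :
    PySem.List.index? s s[j] = some j ↔ s[j] ∉ s.take j := by
  constructor
  · intro h hmem
    obtain ⟨_, _, hne⟩ := PySem.List.getElem_of_index?_eq_some h
    obtain ⟨i, hi, hget⟩ := List.mem_take_iff_getElem.1 hmem
    exact hne i (by omega) hget
  · intro h
    rw [PySem.List.index?_eq_some_iff]
    refine ⟨s.take j, s.drop (j + 1), ?_, by simp; omega, h⟩
    conv_lhs => rw [← List.take_append_drop j s]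
    congr 1
    rw [List.drop_eq_getElem_cons hj]

-- ===== VERDICT (by name: the statement is the Claim_ definition above) =====
theorem into_dollar_spec : Claim_equal_into_dollar := by
  intro sentence _
  unfold Spec_into_dollar into_dollar into_dollar_alt
  rw [pv_loopA sentence.toList [] [] PySem.Dict.empty
      (by intro c; simp [PySem.Dict.contains_empty])]
  set s := sentence.toList with hs
  congr 1
  simp only [List.nil_append]
  apply List.ext_getElem?
  intro j
  rw [pv_fold_get s (PySem.List.dedup s) _ j (by simp), pv_mark_get s [] j]
  by_cases hj : j < s.length
  · rw [List.getElem?_eq_getElem hj, Option.map_some]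
    by_cases hfirst : s[j] ∈ s.take j
    · have hmem' : s[j] ∈ ([] : List Char) ++ s.take j := by simpa using hfirst
      rw [if_pos hmem']
      have hne2 : ¬ ∃ c ∈ PySem.List.dedup s, PySem.List.index? s c = some j := by
        rintro ⟨c, hc, hcj⟩
        obtain ⟨hk, hget, hne⟩ := PySem.List.getElem_of_index?_eq_some hcj
        obtain ⟨i, hi, hgi⟩ := List.mem_take_iff_getElem.1 hfirst
        exact hne i (by omega) (by rw [hgi, hget])
      rw [if_neg hne2, List.getElem?_replicate, if_pos hj]
    · have hmem' : s[j] ∉ ([] : List Char) ++ s.take j := by simpa using hfirst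
      rw [if_neg hmem', if_pos ⟨s[j], (PySem.List.mem_dedup s s[j]).2 (List.getElem_mem hj),
          (pv_first_iff s j hj).2 hfirst⟩]
  · have hne : ¬ ∃ c ∈ PySem.List.dedup s, PySem.List.index? s c = some j := by
      rintro ⟨c, _, hcj⟩
      obtain ⟨hk, _, _⟩ := PySem.List.getElem_of_index?_eq_some hcj
      omega
    rw [if_neg hne, List.getElem?_replicate, if_neg hj, List.getElem?_eq_none (le_of_not_gt hj)]
    rfl
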